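-- pv_equiv track=rewrite | github.com/pypi-data/pypi-mirror-93 | packages/fdi/fdi-1.0.8.tar.gz/fdi-1.0.8/fdi/utils/masked.py | masked
-- ===== SOURCE A (Python) =====
-- def masked(value, mask):
--     """ Returns the masked part of the value, high bit number of mask, how wide.
--
--     e.g. value=0b00101100 mask=0b00011100, the result is 0b011, 5, 3
--     """
--     shift = 0
--     m = mask
--     # count how many 0s on the right side
--     while (m & 1) == 0 and shift <= 64:
--         m >>= 1
--         shift += 1
--     v = (value & mask) >> shift
--     # get the width of the mask
--     wide = 0
--     while m:
--         m >>= 1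
--         wide += 1
--     return v, shift+wide, wide
-- ===== SOURCE B (Python) =====
-- def masked(value, mask):
--     """ Returns the masked part of the value, high bit number of mask, how wide.
--
--     e.g. value=0b00101100 mask=0b00011100, the result is 0b011, 5, 3
--     """
--     if mask == 0:
--         return 0, 0, 0
--     shift = (mask & -mask).bit_length() - 1   # trailing zeros of mask
--     high = mask.bit_length()
--     return (value & mask) >> shift, high, high - shift
-- ===== Notes on version B (the rewrite author's own statement) =====
-- stated objective: idiomatic
-- what changed: Replaces the two counting while-loops with closed-form bit arithmetic: trailing zeros via (mask & -mask).bit_length() - 1 and the width/high-bit via mask.bit_length().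
-- intended difference: For mask == 0, A returns (0, 65, 0) where 65 is an artefact of its trailing-zero loop's 64-iteration cap; B returns (0, 0, 0), the intended answer for an empty mask (no value bits, no high bit, zero width). — e.g. on masked(5, 0): A returns (0, 65, 0), B returns (0, 0, 0)
import Mathlib
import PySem

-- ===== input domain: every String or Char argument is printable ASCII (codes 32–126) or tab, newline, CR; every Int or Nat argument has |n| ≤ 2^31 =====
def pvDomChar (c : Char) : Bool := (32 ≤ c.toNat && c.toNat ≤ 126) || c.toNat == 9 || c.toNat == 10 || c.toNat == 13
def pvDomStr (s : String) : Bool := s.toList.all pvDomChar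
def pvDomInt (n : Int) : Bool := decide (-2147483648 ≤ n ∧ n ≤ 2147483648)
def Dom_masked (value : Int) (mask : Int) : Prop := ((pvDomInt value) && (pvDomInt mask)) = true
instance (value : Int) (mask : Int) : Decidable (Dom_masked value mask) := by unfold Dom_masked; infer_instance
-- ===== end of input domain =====

-- B replaces A's two counting while-loops by closed-form bit arithmetic (bit_length / mask & -mask); idiomatic, not claimed faster.

-- ===== PORT A =====
-- 'while (m & 1) == 0 and shift <= 64: m >>= 1; shift += 1'
def maskedShiftLoop (m : Int) (shift : Int) : Int × Int :=
  if h : PySem.Int.band m 1 = 0 ∧ shift ≤ 64 then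
    maskedShiftLoop (m >>> (1:Nat)) (shift + 1)
  else
    (m, shift)
termination_by (65 - shift).toNat
decreasing_by omega

-- 'while m: m >>= 1; wide += 1'.  The guard 'm ≤ 0' (instead of Python's 'm == 0') only makes the
-- recursion total: for m < 0 Python diverges (such inputs are excluded by Pre_masked).
def maskedWideLoop (m : Int) (wide : Int) : Int :=
  if h : m ≤ 0 then
    wide
  else
    maskedWideLoop (m >>> (1:Nat)) (wide + 1)
termination_by m.toNat
decreasing_by
  have h1 : m >>> (1:Nat) = m / 2 := by simpa using Int.shiftRight_eq_div_pow m 1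
  omega

def masked (value : Int) (mask : Int) : Int × Int × Int :=
  let p := maskedShiftLoop mask 0
  let m := p.1
  let shift := p.2
  -- shift is always ≥ 0 here, so '.toNat' is exact for Python's '>> shift'
  let v := (PySem.Int.band value mask) >>> shift.toNat
  let wide := maskedWideLoop m 0
  (v, shift + wide, wide)

-- ===== PORT B =====
def masked_alt (value : Int) (mask : Int) : Int × Int × Int :=
  if mask = 0 then (0, 0, 0)
  else
    let shift : Int := (PySem.Int.bitLength (PySem.Int.band mask (-mask)) : Int) - 1
    let high : Int := (PySem.Int.bitLength mask : Int)
    ((PySem.Int.band value mask) >>> shift.toNat, high, high - shift)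

-- ===== PRECONDITION & SPEC =====
-- Pre_ excludes negative masks: there A's second while-loop never terminates (Python diverges).
def Pre_masked (value : Int) (mask : Int) : Prop := 0 ≤ mask
instance (value : Int) (mask : Int) : Decidable (Pre_masked value mask) := by unfold Pre_masked; infer_instance
def pvWitness_masked : Int × Int := (44, 28)

-- For mask == 0, A returns (0, 65, 0) where 65 is an artefact of its trailing-zero loop's
-- 64-iteration cap; B returns (0, 0, 0), the intended answer for an empty mask.
def D_masked (value : Int) (mask : Int) : Prop := mask = 0
instance (value : Int) (mask : Int) : Decidable (D_masked value mask) := by unfold D_masked; infer_instance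

def Spec_masked (value : Int) (mask : Int) (out : Int × Int × Int) : Prop := ¬ D_masked value mask → out = masked_alt value mask
instance (value : Int) (mask : Int) (out : Int × Int × Int) : Decidable (Spec_masked value mask out) := by unfold Spec_masked; infer_instance

def pvDiffWitness_masked : Int × Int := (5, 0)
def pvDiffWitnessOut_masked : (Int × Int × Int) × (Int × Int × Int) := ((0, 65, 0), (0, 0, 0))

-- ===== CLAIM (what is proved, stated in full; the proofs are below) =====
def Claim_unchanged_masked : Prop := ∀ (value : Int) (mask : Int), Dom_masked value mask → Pre_masked value mask → Spec_masked value mask (masked value mask)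
def Claim_changed_masked : Prop := Dom_masked (pvDiffWitness_masked.1) (pvDiffWitness_masked.2) ∧ Pre_masked (pvDiffWitness_masked.1) (pvDiffWitness_masked.2) ∧ D_masked (pvDiffWitness_masked.1) (pvDiffWitness_masked.2) ∧ masked (pvDiffWitness_masked.1) (pvDiffWitness_masked.2) = pvDiffWitnessOut_masked.1 ∧ masked_alt (pvDiffWitness_masked.1) (pvDiffWitness_masked.2) = pvDiffWitnessOut_masked.2 ∧ pvDiffWitnessOut_masked.1 ≠ pvDiffWitnessOut_masked.2
def Claim_exact_masked : Prop := ∀ (value : Int) (mask : Int), Dom_masked value mask → Pre_masked value mask → D_masked value mask → masked value mask ≠ masked_alt value mask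

-- ===== LEMMAS AND PROOFS =====

-- trailing-zero count of a positive Nat
def tzN (M : Nat) : Nat :=
  if h : M % 2 = 1 ∨ M = 0 then 0 else tzN (M / 2) + 1
termination_by M
decreasing_by omega

lemma tzN_odd {M : Nat} (h : M % 2 = 1) : tzN M = 0 := by
  rw [tzN]; simp [h]

lemma tzN_even {M : Nat} (h : M % 2 = 0) (h0 : M ≠ 0) : tzN M = tzN (M / 2) + 1 := by
  rw [tzN]; simp [h, h0]

lemma land_bit_ft (a b : Nat) : (2 * a) &&& (2 * b + 1) = 2 * (a &&& b) := by
  have := Nat.bitwise_bit (f := and) (a := false) (m := a) (b := true) (n := b)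
  simp [Nat.bit] at this
  simpa [HAnd.hAnd, AndOp.and, Nat.land, Nat.mul_comm] using this

lemma land_bit_tf (a b : Nat) : (2 * a + 1) &&& (2 * b) = 2 * (a &&& b) := by
  have := Nat.bitwise_bit (f := and) (a := true) (m := a) (b := false) (n := b)
  simp [Nat.bit] at this
  simpa [HAnd.hAnd, AndOp.and, Nat.land, Nat.mul_comm] using this

lemma sub_land_pred (M : Nat) (h : 0 < M) : M - (M &&& (M - 1)) = 2 ^ tzN M := by
  induction M using Nat.strong_induction_on with
  | _ M ih =>
    rcases Nat.even_or_odd M with he | ho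
    · -- even
      have hm2 : M % 2 = 0 := Nat.even_iff.mp he
      have hk0 : 0 < M / 2 := by omega
      have hand : M &&& (M - 1) = 2 * ((M / 2) &&& (M / 2 - 1)) := by
        have e1 : M = 2 * (M / 2) := by omega
        have e2 : M - 1 = 2 * (M / 2 - 1) + 1 := by omega
        calc M &&& (M - 1) = (2 * (M / 2)) &&& (2 * (M / 2 - 1) + 1) := by rw [← e1, ← e2]
          _ = 2 * ((M / 2) &&& (M / 2 - 1)) := land_bit_ft (M / 2) (M / 2 - 1)
      have hIH := ih (M / 2) (by omega) hk0
      have hle : (M / 2) &&& (M / 2 - 1) ≤ M / 2 := Nat.and_le_left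
      rw [hand, tzN_even hm2 (by omega), pow_succ]
      omega
    · -- odd
      have hm2 : M % 2 = 1 := Nat.odd_iff.mp ho
      have hand : M &&& (M - 1) = M - 1 := by
        have e1 : M = 2 * (M / 2) + 1 := by omega
        have e2 : M - 1 = 2 * (M / 2) := by omega
        calc M &&& (M - 1) = (2 * (M / 2) + 1) &&& (2 * (M / 2)) := by rw [← e1, ← e2]
          _ = 2 * ((M / 2) &&& (M / 2)) := land_bit_tf (M / 2) (M / 2)
          _ = M - 1 := by rw [Nat.and_self]; omega
      rw [hand, tzN_odd hm2]
      omega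

lemma bitLength_two_pow (t : Nat) : PySem.Int.bitLength ((2 ^ t : Nat) : Int) = t + 1 := by
  induction t with
  | zero => decide
  | succ t ih =>
    rw [PySem.Int.bitLength_natCast (m := 2 ^ (t + 1)) (by positivity)]
    have h2 : 2 ^ (t + 1) / 2 = 2 ^ t := by
      rw [pow_succ]; omega
    rw [h2, ih]

lemma band_self_neg (M : Nat) (h : 0 < M) :
    PySem.Int.band (M : Int) (-(M : Int)) = ((2 ^ tzN M : Nat) : Int) := by
  have hM : ¬ ((0:Int) ≤ -(M : Int)) := by omega
  simp only [PySem.Int.band]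
  rw [if_pos (by positivity), if_neg hM]
  have h1 : ((M : Int)).toNat = M := Int.toNat_natCast M
  have h2 : (-(-(M : Int)) - 1).toNat = M - 1 := by omega
  rw [h1, h2]
  exact_mod_cast congrArg (fun n : Nat => (n : Int)) (sub_land_pred M h)

lemma two_pow_tzN_le (M : Nat) (h : 0 < M) : 2 ^ tzN M ≤ M := by
  induction M using Nat.strong_induction_on with
  | _ M ih =>
    rcases Nat.even_or_odd M with he | ho
    · have hm2 : M % 2 = 0 := Nat.even_iff.mp he
      have hIH := ih (M / 2) (by omega) (by omega)
      rw [tzN_even hm2 (by omega), pow_succ]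
      omega
    · rw [tzN_odd (Nat.odd_iff.mp ho)]
      simpa using h

lemma intCast_shiftRight (M k : Nat) : ((M : Int) >>> k) = ((M >>> k : Nat) : Int) := by
  exact Int.mem_toNat?.mp rfl

lemma wide_loop_eq (M : Nat) : ∀ w : Int, maskedWideLoop (M : Int) w = w + (PySem.Int.bitLength (M : Int) : Int) := by
  induction M using Nat.strong_induction_on with
  | _ M ih =>
    intro w
    rcases Nat.eq_zero_or_pos M with h0 | hpos
    · subst h0
      rw [maskedWideLoop]
      simp [PySem.Int.bitLength_zero]
    · rw [maskedWideLoop, dif_neg (by omega)]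
      rw [intCast_shiftRight M 1, Nat.shiftRight_one]
      rw [ih (M / 2) (by omega) (w + 1)]
      rw [PySem.Int.bitLength_natCast hpos]
      push_cast
      ring

lemma shift_loop_eq (M : Nat) (h : 0 < M) :
    ∀ s : Int, 0 ≤ s → s + (tzN M : Int) ≤ 65 →
      maskedShiftLoop (M : Int) s = (((M >>> tzN M : Nat) : Int), s + (tzN M : Int)) := by
  induction M using Nat.strong_induction_on with
  | _ M ih =>
    intro s hs hcap
    have hband : PySem.Int.band (M : Int) 1 = ((M % 2 : Nat) : Int) := by
      have e1 : ((1:Int)) = ((1 : Nat) : Int) := by norm_num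
      rw [e1, PySem.Int.band_natCast M 1, Nat.and_one_is_mod]
    rcases Nat.even_or_odd M with he | ho
    · have hm2 : M % 2 = 0 := Nat.even_iff.mp he
      have htz := tzN_even hm2 (by omega)
      have hs64 : s ≤ 64 := by rw [htz] at hcap; push_cast at hcap; omega
      rw [maskedShiftLoop, dif_pos ⟨by rw [hband, hm2]; simp, hs64⟩]
      rw [intCast_shiftRight M 1, Nat.shiftRight_one]
      rw [ih (M / 2) (by omega) (by omega) (s + 1) (by omega)
        (by rw [htz] at hcap; push_cast at hcap ⊢; omega)]
      have hsh : M >>> tzN M = (M / 2) >>> tzN (M / 2) := by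
        rw [htz, Nat.add_comm (tzN (M / 2)) 1, Nat.shiftRight_add, Nat.shiftRight_one]
      rw [← hsh, htz]
      simp only [Prod.mk.injEq]
      exact ⟨trivial, by push_cast; ring⟩
    · have hm2 : M % 2 = 1 := Nat.odd_iff.mp ho
      rw [maskedShiftLoop, dif_neg (by rw [hband, hm2]; simp)]
      rw [tzN_odd hm2]
      simp

lemma bl_shift (M : Nat) (h : 0 < M) :
    PySem.Int.bitLength ((M >>> tzN M : Nat) : Int) + tzN M = PySem.Int.bitLength (M : Int) := by
  induction M using Nat.strong_induction_on with
  | _ M ih =>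
    rcases Nat.even_or_odd M with he | ho
    · have hm2 : M % 2 = 0 := Nat.even_iff.mp he
      have htz := tzN_even hm2 (by omega)
      have hsh : M >>> tzN M = (M / 2) >>> tzN (M / 2) := by
        rw [htz, Nat.add_comm (tzN (M / 2)) 1, Nat.shiftRight_add, Nat.shiftRight_one]
      rw [hsh, htz, PySem.Int.bitLength_natCast h]
      have hIH := ih (M / 2) (by omega) (by omega)
      omega
    · rw [tzN_odd (Nat.odd_iff.mp ho)]
      simp

lemma shift_loop_zero : ∀ k : Nat, k ≤ 65 → maskedShiftLoop 0 (65 - (k : Int)) = (0, 65) := by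
  intro k
  induction k with
  | zero => intro _; rw [maskedShiftLoop]; norm_num
  | succ k ih =>
    intro hk
    rw [maskedShiftLoop, dif_pos ⟨by decide, by push_cast; omega⟩]
    have h1 : (0 : Int) >>> (1:Nat) = 0 := by decide
    have h2 : (65 : Int) - (↑(k + 1)) + 1 = 65 - ↑k := by push_cast; ring
    rw [h1, h2]
    exact ih (by omega)

lemma masked_zero (value : Int) : masked value 0 = (0, 65, 0) := by
  have hloop : maskedShiftLoop 0 0 = (0, 65) := by
    have h := shift_loop_zero 65 (le_refl 65)
    norm_num at h
    exact h
  have hw : maskedWideLoop 0 0 = 0 := by rw [maskedWideLoop]; simp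
  simp only [masked, hloop]
  simp [hw, PySem.Int.band_zero]

-- ===== VERDICT (by name: the statement is the Claim_ definition above) =====
theorem masked_spec : Claim_unchanged_masked := by
  intro value mask hdom hpre hnd
  have h0 : mask ≠ 0 := hnd
  have hpre' : (0:Int) ≤ mask := hpre
  obtain ⟨M, hM⟩ : ∃ M : Nat, mask = (M : Int) := ⟨mask.toNat, by omega⟩
  subst hM
  have hMpos : 0 < M := by omega
  have hMle : M ≤ 2 ^ 31 := by
    have hd := hdom
    unfold Dom_masked pvDomInt at hd
    simp at hd
    omega
  have htzle : tzN M ≤ 31 := by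
    by_contra hc
    have h32 : 2 ^ 32 ≤ 2 ^ tzN M := Nat.pow_le_pow_right (by omega) (by omega)
    have := two_pow_tzN_le M hMpos
    have : (2:Nat) ^ 31 < 2 ^ 32 := by norm_num
    omega
  -- evaluate A
  have hA := shift_loop_eq M hMpos 0 (le_refl 0) (by omega)
  norm_num at hA
  have hW := wide_loop_eq (M >>> tzN M) 0
  have hBL := bl_shift M hMpos
  -- evaluate B's shift
  have hband := band_self_neg M hMpos
  have hblp := bitLength_two_pow (tzN M)
  have hpos2 : 0 < M >>> tzN M := by
    rw [Nat.shiftRight_eq_div_pow]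
    exact Nat.div_pos (two_pow_tzN_le M hMpos) (by positivity)
  have hbl1 : 1 ≤ PySem.Int.bitLength ((M >>> tzN M : Nat) : Int) := by
    by_contra hc
    have hb : PySem.Int.bitLength ((M >>> tzN M : Nat) : Int) = 0 := by omega
    have hlt := PySem.Int.lt_two_pow_bitLength ((M >>> tzN M : Nat) : Int)
    rw [hb, pow_zero, Int.natAbs_natCast] at hlt
    omega
  have htzbl : tzN M < PySem.Int.bitLength (M : Int) := by omega
  simp only [masked, masked_alt, hA, hband, hblp, if_neg h0]
  have hsh : (M : Int) >>> tzN M = ((M >>> tzN M : Nat) : Int) := intCast_shiftRight M (tzN M)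
  have ht2 : ((tzN M + 1 : Nat) : Int) - 1 = ((tzN M : Nat) : Int) := by push_cast; ring
  rw [hsh, hW, ht2]
  simp only [Prod.mk.injEq]
  exact ⟨trivial, by omega, by omega⟩

theorem masked_changed : Claim_changed_masked := by
  unfold Claim_changed_masked
  refine ⟨by decide, by decide, by decide, masked_zero 5, by rfl, by decide⟩

theorem masked_tight : Claim_exact_masked := by
  intro value mask hdom hpre hd
  have h0 : mask = 0 := hd
  subst h0
  rw [masked_zero]
  simp [masked_alt]
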